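-- pv_equiv track=rewrite | github.com/Raghunandan-19/Python | basic_hashing/sum_of_highest_and_lowest_frequency.py | sumHighestAndLowestFrequency
-- ===== SOURCE A (Python) =====
-- def sumHighestAndLowestFrequency(nums):
--     n = len(nums)
--     max_freq = 0
--     min_freq = n
--
--     mpp = {}  # Dictionary to store frequency of each number
--
--     # Count frequency of each number in nums
--     for num in nums:
--         if num in mpp:
--             mpp[num] += 1
--         else:
--             mpp[num] = 1
--
--     # Find maximum and minimum frequency
--     for freq in mpp.values():
--         max_freq = max(max_freq, freq)
--         min_freq = min(min_freq, freq)
--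
--     # Return the sum of minimum and maximum frequency
--     return (min_freq + max_freq)
-- ===== SOURCE B (Python) =====
-- def sumHighestAndLowestFrequency(nums):
--     if not nums:
--         return 0
--     s = sorted(nums)
--     runs = []
--     run = 1
--     for prev, cur in zip(s, s[1:]):
--         if cur == prev:
--             run += 1
--         else:
--             runs.append(run)
--             run = 1
--     runs.append(run)
--     return min(runs) + max(runs)
-- ===== Notes on version B (the rewrite author's own statement) =====
-- stated objective: faster
-- what changed: Replaces the counting dict plus a scan over its values with sort-then-group: sort a copy, collect run lengths of adjacent equal values in one pass, and return min(runs) + max(runs), guarding the empty list.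
import Mathlib
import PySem

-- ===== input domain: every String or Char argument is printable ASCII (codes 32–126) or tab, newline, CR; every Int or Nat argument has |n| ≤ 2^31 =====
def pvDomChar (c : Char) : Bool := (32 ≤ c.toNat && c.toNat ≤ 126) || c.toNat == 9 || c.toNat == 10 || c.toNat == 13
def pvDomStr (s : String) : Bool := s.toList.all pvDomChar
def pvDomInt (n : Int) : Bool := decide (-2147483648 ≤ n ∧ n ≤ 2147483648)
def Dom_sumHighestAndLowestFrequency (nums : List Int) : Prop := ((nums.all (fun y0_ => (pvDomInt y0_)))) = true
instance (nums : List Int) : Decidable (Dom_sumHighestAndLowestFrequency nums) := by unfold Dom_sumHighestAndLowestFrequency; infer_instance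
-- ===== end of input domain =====

-- B replaces the counting dict + running max/min scan over its values with sort-then-group-runs:
-- one pass over a sorted copy collects the run lengths of adjacent equal values, then min(runs) + max(runs); equal return values.
-- ===== PORT A =====
def sumHighestAndLowestFrequency (nums : List Int) : Int :=
  let n : Int := nums.length
  -- for num in nums: if num in mpp: mpp[num] += 1 else: mpp[num] = 1
  -- (in the taken branch 'mpp[num]' exists, so reading it as getD num 0 is exact)
  let mpp : PySem.Dict Int Int := nums.foldl
    (fun d num => if d.contains num then d.insert num (d.getD num 0 + 1) else d.insert num 1)
    PySem.Dict.empty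
  -- for freq in mpp.values(): max_freq = max(max_freq, freq); min_freq = min(min_freq, freq)
  let r := mpp.values.foldl (fun (p : Int × Int) freq => (max p.1 freq, min p.2 freq)) (0, n)
  r.2 + r.1

-- ===== PORT B =====
def sumHighestAndLowestFrequency_alt (nums : List Int) : Int :=
  if nums = [] then 0
  else
    let s := PySem.List.sorted nums (fun y => y) false
    -- for prev, cur in zip(s, s[1:]): if cur == prev: run += 1 else: runs.append(run); run = 1
    let p := (List.zip s (PySem.List.slice s (some 1) none)).foldl
      (fun (acc : List Int × Int) pc =>
        if pc.2 == pc.1 then (acc.1, acc.2 + 1) else (acc.1 ++ [acc.2], 1))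
      ([], 1)
    let runs := p.1 ++ [p.2]
    -- min(runs) / max(runs): runs is nonempty here, so the .getD 0 default is never used
    (PySem.List.min? runs (fun y => y)).getD 0 + (PySem.List.max? runs (fun y => y)).getD 0

-- ===== PRECONDITION & SPEC =====
def Spec_sumHighestAndLowestFrequency (nums : List Int) (out : Int) : Prop := out = sumHighestAndLowestFrequency_alt nums
instance (nums : List Int) (out : Int) : Decidable (Spec_sumHighestAndLowestFrequency nums out) := by unfold Spec_sumHighestAndLowestFrequency; infer_instance

-- ===== CLAIM (what is proved, stated in full; the proofs are below) =====
def Claim_equal_sumHighestAndLowestFrequency : Prop := ∀ (nums : List Int), Dom_sumHighestAndLowestFrequency nums → Spec_sumHighestAndLowestFrequency nums (sumHighestAndLowestFrequency nums)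

-- ===== LEMMAS AND PROOFS =====

-- A's counting loop builds exactly Counter(nums)
lemma mpp_eq_counter (nums : List Int) :
    nums.foldl
      (fun (d : PySem.Dict Int Int) num =>
        if d.contains num then d.insert num (d.getD num 0 + 1) else d.insert num 1)
      PySem.Dict.empty = PySem.Dict.counter nums := by
  have hstep : (fun (d : PySem.Dict Int Int) num =>
      if d.contains num then d.insert num (d.getD num 0 + 1) else d.insert num 1)
      = fun d num => d.insert num (d.getD num 0 + 1) := by
    funext d x
    by_cases h : d.contains x = true
    · simp [h]
    · have h0 : d.getD x 0 = 0 := by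
        simp only [Bool.not_eq_true] at h
        simp only [PySem.Dict.getD, PySem.Dict.get?, PySem.Dict.contains] at *
        rw [List.find?_eq_none.mpr]
        · rfl
        · intro p hp
          simpa using List.any_eq_false.mp h p hp
      simp [h, h0]
  rw [hstep, PySem.Dict.foldl_insert_getD_add_one_eq_counter]

-- the values list of Counter(nums) is the per-distinct-value count list
lemma counter_values (nums : List Int) :
    (PySem.Dict.counter nums).values
      = (PySem.List.dedup nums).map (fun v => (nums.count v : Int)) := by
  simp only [PySem.Dict.values, PySem.Dict.items_counter, List.map_map,
    PySem.List.dedup_eq_ofList]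
  rfl

-- A's paired running max/min loop splits into two foldls
lemma foldl_maxmin (L : List Int) (a b : Int) :
    L.foldl (fun (p : Int × Int) f => (max p.1 f, min p.2 f)) (a, b)
      = (L.foldl max a, L.foldl min b) := by
  induction L generalizing a b with
  | nil => rfl
  | cons h t ih => simp [List.foldl_cons, ih]

-- recursive form of B's run-collecting loop: previous element, current run length, remaining tail
def runsAux (x : Int) (k : Int) : List Int → List Int
  | [] => [k]
  | y :: t => if y = x then runsAux y (k + 1) t else k :: runsAux y 1 t

-- B's fold over zip(s, s[1:]) computes runsAux
lemma fold_eq_runsAux (t : List Int) : ∀ (x : Int) (acc : List Int) (k : Int),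
    (((x :: t).zip t).foldl
        (fun (acc : List Int × Int) pc =>
          if pc.2 == pc.1 then (acc.1, acc.2 + 1) else (acc.1 ++ [acc.2], 1))
        (acc, k)).1
      ++ [(((x :: t).zip t).foldl
        (fun (acc : List Int × Int) pc =>
          if pc.2 == pc.1 then (acc.1, acc.2 + 1) else (acc.1 ++ [acc.2], 1))
        (acc, k)).2] = acc ++ runsAux x k t := by
  induction t with
  | nil => intro x acc k; simp [runsAux]
  | cons y t ih =>
    intro x acc k
    simp only [List.zip_cons_cons, List.foldl_cons, runsAux]
    by_cases h : y = x
    · simpa [h] using ih y acc (k + 1)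
    · simpa [h] using ih y (acc ++ [k]) 1

lemma runsAux_ne_nil (x k : Int) (t : List Int) : runsAux x k t ≠ [] := by
  induction t generalizing x k with
  | nil => simp [runsAux]
  | cons y t ih => simp only [runsAux]; split <;> simp [ih]

lemma runsAux_replicate_nil (x : Int) (m : Nat) : ∀ k : Int,
    runsAux x k (List.replicate m x) = [k + (m : Int)] := by
  induction m with
  | zero => intro k; simp [runsAux]
  | succ m ih =>
    intro k
    rw [List.replicate_succ,
      show runsAux x k (x :: List.replicate m x) = runsAux x (k + 1) (List.replicate m x) from
        by simp [runsAux],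
      ih (k + 1)]
    congr 1
    push_cast
    ring

lemma runsAux_replicate_cons (x y : Int) (m : Nat) (r : List Int) (hy : y ≠ x) : ∀ k : Int,
    runsAux x k (List.replicate m x ++ y :: r) = (k + (m : Int)) :: runsAux y 1 r := by
  induction m with
  | zero => intro k; simp [runsAux, hy]
  | succ m ih =>
    intro k
    rw [List.replicate_succ, List.cons_append,
      show runsAux x k (x :: (List.replicate m x ++ y :: r))
          = runsAux x (k + 1) (List.replicate m x ++ y :: r) from by simp [runsAux],
      ih (k + 1)]
    congr 1
    push_cast
    ring

-- a sorted list is (count of head) copies of the head followed by a sorted rest without the head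
lemma pairwise_cons_decomp : ∀ (t : List Int) (x : Int), (x :: t).Pairwise (· ≤ ·) →
    ∃ rest : List Int, x :: t = List.replicate ((x :: t).count x) x ++ rest ∧
      x ∉ rest ∧ rest.Pairwise (· ≤ ·) := by
  intro t
  induction t with
  | nil =>
    intro x _
    exact ⟨[], by simp, by simp, List.Pairwise.nil⟩
  | cons y t ih =>
    intro x h
    by_cases hxy : y = x
    · subst hxy
      obtain ⟨rest, heq, hmem, hp⟩ := ih y h.of_cons
      refine ⟨rest, ?_, hmem, hp⟩
      have hc : (y :: y :: t).count y = (y :: t).count y + 1 := by simp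
      rw [hc, List.replicate_succ, List.cons_append, ← heq]
    · have hx : x ∉ y :: t := by
        intro hmem
        rcases List.mem_cons.mp hmem with h1 | h1
        · exact hxy h1.symm
        · have hxy' : x ≤ y := (List.pairwise_cons.mp h).1 y (by simp)
          have hyx : y ≤ x := (List.pairwise_cons.mp h.of_cons).1 x h1
          exact hxy (le_antisymm hyx hxy')
      refine ⟨y :: t, ?_, hx, h.of_cons⟩
      have hc1 : (x :: y :: t).count x = 1 := by
        simp [List.count_eq_zero_of_not_mem hx]
      simp [hc1]

-- run lengths of a sorted list are exactly the element frequencies, as a set of values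
lemma mem_runsAux_sorted : ∀ (n : Nat) (s : List Int), s.length = n →
    s.Pairwise (· ≤ ·) → ∀ (x : Int) (t : List Int), s = x :: t → ∀ f : Int,
    (f ∈ runsAux x 1 t ↔ ∃ v ∈ s, f = (s.count v : Int)) := by
  intro n
  induction n using Nat.strong_induction_on with
  | _ n ih =>
    intro s hlen hsort x t hs f
    subst hs
    obtain ⟨rest, heq, hxrest, hprest⟩ := pairwise_cons_decomp t x hsort
    have hc1 : 1 ≤ (x :: t).count x := List.count_pos_iff.mpr (by simp)
    obtain ⟨m, hm⟩ : ∃ m : Nat, (x :: t).count x = m + 1 :=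
      ⟨(x :: t).count x - 1, by omega⟩
    have ht : t = List.replicate m x ++ rest := by
      rw [hm, List.replicate_succ, List.cons_append] at heq
      exact (List.cons.injEq _ _ _ _).mp heq |>.2
    rcases rest with _ | ⟨y, r⟩
    · simp only [List.append_nil] at ht heq
      subst ht
      rw [runsAux_replicate_nil]
      have hcx : (x :: List.replicate m x).count x = m + 1 := by simp
      constructor
      · intro hf
        refine ⟨x, by simp, ?_⟩
        simp only [List.mem_singleton] at hf
        rw [hf, hcx]
        push_cast
        ring
      · rintro ⟨v, hv, hfv⟩
        have hvx : v = x := by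
          rcases List.mem_cons.mp hv with h | h
          · exact h
          · exact List.eq_of_mem_replicate h
        subst hvx
        rw [hcx] at hfv
        simp only [List.mem_singleton]
        rw [hfv]
        push_cast
        ring
    · have hyx : y ≠ x := fun h => hxrest (h ▸ List.mem_cons_self)
      have hrw : runsAux x 1 t = (1 + (m : Int)) :: runsAux y 1 r := by
        rw [ht, runsAux_replicate_cons x y m r hyx]
      rw [hrw]
      have hrlen : (y :: r).length < n := by
        have : (x :: t).length = m + 1 + (y :: r).length := by
          rw [ht]; simp; omega
        omega
      have ihrest := ih (y :: r).length hrlen (y :: r) rfl hprest y r rfl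
      -- counts of elements of rest are unaffected by the leading replicate block
      have hcount : ∀ v, v ∈ y :: r → (x :: t).count v = (y :: r).count v := by
        intro v hv
        have hvx : v ≠ x := fun h => hxrest (h ▸ hv)
        rw [heq, List.count_append, List.count_replicate]
        simp [Ne.symm hvx]
      constructor
      · intro hf
        rcases List.mem_cons.mp hf with hf | hf
        · refine ⟨x, by simp, ?_⟩
          rw [hf, hm]
          push_cast
          ring
        · obtain ⟨v, hv, hfv⟩ := (ihrest f).mp hf
          exact ⟨v, by rw [heq]; exact List.mem_append_right _ hv,
            by rw [hcount v hv]; exact hfv⟩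
      · rintro ⟨v, hv, hfv⟩
        rw [heq] at hv
        rcases List.mem_append.mp hv with hv | hv
        · have hvx : v = x := List.eq_of_mem_replicate hv
          have hfm : f = 1 + (m : Int) := by
            rw [hfv, hvx, hm]
            push_cast
            ring
          simp [hfm]
        · right
          exact (ihrest f).mpr ⟨v, hv, by rw [← hcount v hv]; exact hfv⟩

-- two nonempty lists with the same elements have the same minimum and maximum values
lemma extrema_eq_of_mem_iff (L M : List Int) (h : ∀ g, g ∈ L ↔ g ∈ M)
    (hL : L ≠ []) (hM : M ≠ []) :
    (PySem.List.min? L (fun y => y)).getD 0 = (PySem.List.min? M (fun y => y)).getD 0 ∧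
    (PySem.List.max? L (fun y => y)).getD 0 = (PySem.List.max? M (fun y => y)).getD 0 := by
  obtain ⟨a, ha⟩ := Option.ne_none_iff_exists'.mp
    (fun hn => hL ((PySem.List.min?_eq_none_iff L (fun y : Int => y)).mp hn))
  obtain ⟨b, hb⟩ := Option.ne_none_iff_exists'.mp
    (fun hn => hM ((PySem.List.min?_eq_none_iff M (fun y : Int => y)).mp hn))
  obtain ⟨c, hc⟩ := Option.ne_none_iff_exists'.mp
    (fun hn => hL ((PySem.List.max?_eq_none_iff L (fun y : Int => y)).mp hn))
  obtain ⟨d, hd⟩ := Option.ne_none_iff_exists'.mp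
    (fun hn => hM ((PySem.List.max?_eq_none_iff M (fun y : Int => y)).mp hn))
  have hab : a = b :=
    le_antisymm
      (PySem.List.min?_isMin ha b ((h b).mpr (PySem.List.min?_mem hb)))
      (PySem.List.min?_isMin hb a ((h a).mp (PySem.List.min?_mem ha)))
  have hcd : c = d :=
    le_antisymm
      (PySem.List.max?_isMax hd c ((h c).mp (PySem.List.max?_mem hc)))
      (PySem.List.max?_isMax hc d ((h d).mpr (PySem.List.max?_mem hd)))
  rw [ha, hb, hc, hd, hab, hcd]
  exact ⟨rfl, rfl⟩

-- ===== VERDICT (by name: the statement is the Claim_ definition above) =====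
theorem sumHighestAndLowestFrequency_spec : Claim_equal_sumHighestAndLowestFrequency := by
  intro nums _
  unfold Spec_sumHighestAndLowestFrequency
  cases nums with
  | nil => rfl
  | cons x t =>
    unfold sumHighestAndLowestFrequency sumHighestAndLowestFrequency_alt
    simp only [mpp_eq_counter, counter_values, if_neg (List.cons_ne_nil x t)]
    -- name the sorted copy and its head/tail
    have hslen : (PySem.List.sorted (x :: t) (fun y => y) false).length = t.length + 1 := by
      rw [PySem.List.length_sorted]; rfl
    cases hs : PySem.List.sorted (x :: t) (fun y => y) false with
    | nil => rw [hs] at hslen; simp at hslen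
    | cons x' t' =>
      have hperm : (x' :: t').Perm (x :: t) := hs ▸ PySem.List.sorted_perm (x :: t) _ false
      have hsort : (x' :: t').Pairwise (· ≤ ·) := by
        have := PySem.List.sorted_pairwise (x :: t) (fun y => y)
        rw [hs] at this
        exact this
      -- B's loop: runs = runsAux x' 1 t'
      have hslice : PySem.List.slice (x' :: t') (some 1) none = t' :=
        PySem.List.slice_from_one (x' :: t')
      have hruns := fold_eq_runsAux t' x' [] 1
      simp only [List.nil_append] at hruns
      rw [hslice, hruns]
      -- A's freqs list is nonempty
      rcases hF : (PySem.List.dedup (x :: t)).map (fun v => ((x :: t).count v : Int)) with _ | ⟨f, L'⟩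
      · exfalso
        have hx : x ∈ PySem.List.dedup (x :: t) := (PySem.List.mem_dedup _ _).mpr (by simp)
        have : ((x :: t).count x : Int) ∈
            (PySem.List.dedup (x :: t)).map (fun v => ((x :: t).count v : Int)) :=
          List.mem_map_of_mem hx
        rw [hF] at this
        exact (List.not_mem_nil) this
      · -- bounds on the first frequency, to absorb A's (0, n) fold seed
        have hf : f ∈ (PySem.List.dedup (x :: t)).map (fun v => ((x :: t).count v : Int)) := by
          rw [hF]; exact List.mem_cons_self
        obtain ⟨v, hv, hfv⟩ := List.mem_map.mp hf
        have hvmem : v ∈ (x :: t) := (PySem.List.mem_dedup _ _).mp hv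
        have h1 : 1 ≤ f := by
          have := List.count_pos_iff.mpr hvmem
          omega
        have h2 : f ≤ ((x :: t).length : Int) := by
          have := List.count_le_length (l := x :: t) (a := v)
          omega
        rw [foldl_maxmin]
        simp only [List.foldl_cons]
        rw [show max 0 f = f by omega, show min ((x :: t).length : Int) f = f by omega,
          ← Option.getD_some (a := L'.foldl min f) (b := (0 : Int)),
          ← Option.getD_some (a := L'.foldl max f) (b := (0 : Int)),
          ← PySem.List.min?_id_cons, ← PySem.List.max?_id_cons, ← hF]
        -- the run-length list and the frequency list have the same elements
        have hmemiff : ∀ g : Int, g ∈ runsAux x' 1 t' ↔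
            g ∈ (PySem.List.dedup (x :: t)).map (fun v => ((x :: t).count v : Int)) := by
          intro g
          rw [mem_runsAux_sorted (x' :: t').length (x' :: t') rfl hsort x' t' rfl g]
          constructor
          · rintro ⟨w, hw, hgw⟩
            refine List.mem_map.mpr ⟨w, (PySem.List.mem_dedup _ _).mpr (hperm.mem_iff.mp hw), ?_⟩
            rw [← hperm.count_eq w]
            exact hgw.symm
          · intro hg
            obtain ⟨w, hw, hgw⟩ := List.mem_map.mp hg
            exact ⟨w, hperm.mem_iff.mpr ((PySem.List.mem_dedup _ _).mp hw),
              by rw [hperm.count_eq w]; exact hgw.symm⟩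
        have hext := extrema_eq_of_mem_iff (runsAux x' 1 t')
          ((PySem.List.dedup (x :: t)).map (fun v => ((x :: t).count v : Int)))
          hmemiff (runsAux_ne_nil x' 1 t') (by rw [hF]; exact List.cons_ne_nil f L')
        rw [← hext.1, ← hext.2]
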